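-- pv_equiv track=rewrite | github.com/LeaWron/mdd-paradigm | tests/test_gen.py | check_gng
-- ===== SOURCE A (Python) =====
-- def check_gng(
--     sequence: dict,
--     max_seq_same: int = 6,
-- ):
--     for block_index, block in sequence.items():
--         pre = None
--         cnt = 0
--
--         go_cnt, nogo_cnt = 0, 0
--
--         for trial_index, trial in enumerate(block):
--             if trial is True:
--                 go_cnt += 1
--             else:
--                 nogo_cnt += 1
--             if pre == trial:
--                 cnt += 1
--                 if cnt > max_seq_same:
--                     return False
--             else:
--                 cnt = 1
--             pre = trial
--         if go_cnt != 42 or nogo_cnt != 18: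
--             return False
--     return True
-- ===== SOURCE B (Python) =====
-- def check_gng(
--     sequence: dict,
--     max_seq_same: int = 6,
-- ):
--     # A run longer than max_seq_same exists iff some window of L consecutive
--     # trials is constant, where L = max(max_seq_same + 1, 2) (runs of length 1
--     # never trip A's counter, so the window is at least 2 wide).
--     L = max(max_seq_same + 1, 2)
--     for block in sequence.values():
--         n = len(block)
--         if n != 60 or sum(block) != 42:
--             return False
--         if any(block[i:i + L] == [block[i]] * L for i in range(n - L + 1)):
--             return False
--     return True
-- ===== Notes on version B (the rewrite author's own statement) =====
-- stated objective: alternative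
-- what changed: Replaced A's stateful run-counting loop (pre/cnt/go/nogo with early returns) by per-block count checks (len == 60, sum == 42) plus a sliding-window scan: a run longer than max_seq_same exists iff some window of max(max_seq_same+1, 2) consecutive trials is constant.
import Mathlib
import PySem

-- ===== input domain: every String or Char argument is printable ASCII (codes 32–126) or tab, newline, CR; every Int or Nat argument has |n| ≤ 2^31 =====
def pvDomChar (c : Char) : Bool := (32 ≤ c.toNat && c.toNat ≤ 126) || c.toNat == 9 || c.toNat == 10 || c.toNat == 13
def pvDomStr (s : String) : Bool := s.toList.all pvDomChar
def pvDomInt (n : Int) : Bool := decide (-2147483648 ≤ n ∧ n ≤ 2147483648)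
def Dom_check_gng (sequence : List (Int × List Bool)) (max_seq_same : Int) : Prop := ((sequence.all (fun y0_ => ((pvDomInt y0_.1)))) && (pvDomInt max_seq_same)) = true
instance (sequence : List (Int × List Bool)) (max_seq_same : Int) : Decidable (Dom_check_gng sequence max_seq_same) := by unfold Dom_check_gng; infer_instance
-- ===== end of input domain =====

-- B replaces A's stateful run-counting loop (pre/cnt/go/nogo) by a per-block length/sum
-- count plus a sliding-window test (a run longer than max_seq_same exists iff some window
-- of max(max_seq_same+1, 2) consecutive trials is constant); alternative algorithm, same value.

-- ===== PORT A =====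
-- inner 'for trial in block' loop of A: state (pre, cnt, go_cnt, nogo_cnt); none = 'return False'
def pvInnerA (max_seq_same : Int) : List Bool → Option Bool → Int → Int → Int → Option (Int × Int)
  | [], _, _, go, nogo => some (go, nogo)
  | t :: ts, pre, cnt, go, nogo =>
    let go' := if t then go + 1 else go
    let nogo' := if t then nogo else nogo + 1
    if pre == some t then
      if cnt + 1 > max_seq_same then none
      else pvInnerA max_seq_same ts (some t) (cnt + 1) go' nogo'
    else pvInnerA max_seq_same ts (some t) 1 go' nogo'

def check_gng (sequence : List (Int × List Bool)) (max_seq_same : Int) : Bool :=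
  match sequence with
  | [] => true
  | (_, block) :: rest =>
    match pvInnerA max_seq_same block none 0 0 0 with
    | none => false
    | some (go, nogo) =>
      if go ≠ 42 ∨ nogo ≠ 18 then false else check_gng rest max_seq_same

-- ===== PORT B =====
-- sum(block)  (Python sums the bools as ints)
def pvSum (block : List Bool) : Int := (block.map (fun t => if t then (1 : Int) else 0)).sum

-- any(block[i:i + L] == [block[i]] * L for i in range(n - L + 1)); the 'none' branch of
-- block[i] is unreachable (every i the range produces is a valid index since L ≥ 2)
def pvWindowBad (block : List Bool) (L : Int) : Bool :=
  (PySem.List.pyRange 0 (PySem.List.len block - L + 1) 1).any (fun i =>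
    match PySem.List.pyGet? block i with
    | some c => PySem.List.slice block (some i) (some (i + L)) == PySem.List.pyRepeat [c] L
    | none => false)

-- the 'for block in sequence.values()' loop of B
def pvCheckBlocks (L : Int) : List (Int × List Bool) → Bool
  | [] => true
  | (_, block) :: rest =>
    if PySem.List.len block ≠ 60 ∨ pvSum block ≠ 42 then false
    else if pvWindowBad block L then false
    else pvCheckBlocks L rest

def check_gng_alt (sequence : List (Int × List Bool)) (max_seq_same : Int) : Bool :=
  pvCheckBlocks (max (max_seq_same + 1) 2) sequence

-- ===== PRECONDITION & SPEC =====
def Spec_check_gng (sequence : List (Int × List Bool)) (max_seq_same : Int) (out : Bool) : Prop := out = check_gng_alt sequence max_seq_same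
instance (sequence : List (Int × List Bool)) (max_seq_same : Int) (out : Bool) : Decidable (Spec_check_gng sequence max_seq_same out) := by unfold Spec_check_gng; infer_instance

-- ===== CLAIM (what is proved, stated in full; the proofs are below) =====
def Claim_equal_check_gng : Prop := ∀ (sequence : List (Int × List Bool)) (max_seq_same : Int), Dom_check_gng sequence max_seq_same → Spec_check_gng sequence max_seq_same (check_gng sequence max_seq_same)

-- ===== LEMMAS AND PROOFS =====

-- run lengths of the maximal runs of the block (proof-side characterisation)
def pvRunsAux (cur : Bool) (cnt : Int) : List Bool → List Int
  | [] => [cnt]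
  | t :: ts => if t == cur then pvRunsAux cur (cnt + 1) ts else cnt :: pvRunsAux t 1 ts

def pvRuns : List Bool → List Int
  | [] => []
  | t :: ts => pvRunsAux t 1 ts

def pvMaxRun (block : List Bool) : Int := (pvRuns block).foldl max 0

lemma foldl_max_max (l : List Int) : ∀ a b : Int, l.foldl max (max a b) = max a (l.foldl max b) := by
  induction l with
  | nil => intro a b; simp
  | cons x l ih => intro a b; simp only [List.foldl_cons, max_assoc, ih]

lemma le_foldl_max' (l : List Int) : ∀ a : Int, a ≤ l.foldl max a := by
  induction l with
  | nil => intro a; simp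
  | cons x l ih => intro a; exact le_trans (le_max_left a x) (ih _)

lemma runsAux_le_foldl (ts : List Bool) : ∀ (cur : Bool) (cnt a : Int),
    cnt ≤ (pvRunsAux cur cnt ts).foldl max a := by
  induction ts with
  | nil => intro cur cnt a; simp [pvRunsAux]
  | cons t ts ih =>
    intro cur cnt a
    by_cases h : t = cur
    · simpa [pvRunsAux, h] using le_trans (by omega) (ih cur (cnt + 1) a)
    · have : (t == cur) = false := by simp [h]
      simpa [pvRunsAux, this] using
        le_trans (le_max_right a cnt) (le_foldl_max' _ (max a cnt))

-- counts invariant of A's inner loop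
lemma innerA_counts (m : Int) (ts : List Bool) : ∀ (pre : Option Bool) (cnt go nogo g n : Int),
    pvInnerA m ts pre cnt go nogo = some (g, n) →
    g = go + (ts.count true : Int) ∧ n = nogo + (ts.count false : Int) := by
  induction ts with
  | nil => intro pre cnt go nogo g n h; simp [pvInnerA] at h; simp [h.1.symm, h.2.symm]
  | cons t ts ih =>
    intro pre cnt go nogo g n h
    simp only [pvInnerA] at h
    cases t with
    | true =>
      split at h
      · split at h
        · exact absurd h (by simp)
        · have := ih _ _ _ _ _ _ h
          constructor <;> simp [this.1, this.2, List.count_cons] <;> ring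
      · have := ih _ _ _ _ _ _ h
        constructor <;> simp [this.1, this.2, List.count_cons] <;> ring
    | false =>
      split at h
      · split at h
        · exact absurd h (by simp)
        · have := ih _ _ _ _ _ _ h
          constructor <;> simp [this.1, this.2, List.count_cons] <;> ring
      · have := ih _ _ _ _ _ _ h
        constructor <;> simp [this.1, this.2, List.count_cons] <;> ring

-- m ≥ 1: A's early return fires iff the longest run (incl. the pending one) exceeds m
lemma innerA_none_iff (m : Int) (hm : 1 ≤ m) (ts : List Bool) :
    ∀ (cur : Bool) (cnt go nogo : Int), 1 ≤ cnt → cnt ≤ m →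
    (pvInnerA m ts (some cur) cnt go nogo = none ↔ m < (pvRunsAux cur cnt ts).foldl max 0) := by
  induction ts with
  | nil =>
    intro cur cnt go nogo h1 h2
    simp only [pvInnerA, pvRunsAux, List.foldl_cons, List.foldl_nil]
    constructor
    · intro h; exact absurd h (by simp)
    · intro h; omega
  | cons t ts ih =>
    intro cur cnt go nogo h1 h2
    by_cases h : t = cur
    · subst h
      simp only [pvInnerA, pvRunsAux, beq_self_eq_true, if_true]
      by_cases hc : cnt + 1 > m
      · simp only [if_pos hc]
        constructor
        · intro _
          exact lt_of_lt_of_le (by omega) (runsAux_le_foldl ts t (cnt + 1) 0)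
        · intro _; trivial
      · simp only [if_neg hc]
        exact ih t (cnt + 1) _ _ (by omega) (by omega)
    · have hb : (t == cur) = false := by simp [h]
      have hb2 : ((some cur == some t) : Bool) = false := by simp [Ne.symm h]
      simp only [pvInnerA, pvRunsAux, hb, hb2, if_false, Bool.false_eq_true, List.foldl_cons]
      have := ih t 1 (if t then go + 1 else go) (if t then nogo else nogo + 1) le_rfl hm
      rw [this]
      rw [max_comm (0 : Int) cnt, foldl_max_max, lt_max_iff]
      omega

-- m ≤ 0: A's early return fires iff the block has two equal neighbours
def pvHasAdj : List Bool → Bool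
  | [] => false
  | [_] => false
  | a :: b :: l => (a == b) || pvHasAdj (b :: l)

lemma innerA_none_iff_nonpos (m : Int) (hm : m ≤ 0) (ts : List Bool) :
    ∀ (cur : Bool) (go nogo cnt : Int), 1 ≤ cnt →
    (pvInnerA m ts (some cur) cnt go nogo = none ↔ pvHasAdj (cur :: ts) = true) := by
  induction ts with
  | nil =>
    intro cur go nogo cnt h1
    simp [pvInnerA, pvHasAdj]
  | cons t ts ih =>
    intro cur go nogo cnt h1
    by_cases h : t = cur
    · subst h
      have hc : m < cnt + 1 := by omega
      simp [pvInnerA, pvHasAdj, hc]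
    · have hb2 : ((some cur == some t) : Bool) = false := by simp [Ne.symm h]
      have hadj : (cur == t) = false := by simp [Ne.symm h]
      simp only [pvInnerA, hb2, Bool.false_eq_true, if_false, pvHasAdj, hadj, Bool.false_or]
      exact ih t _ _ 1 le_rfl

lemma count_false_eq (l : List Bool) : (l.count false : Int) = (l.length : Int) - l.count true := by
  induction l with
  | nil => simp
  | cons a l ih => cases a <;> simp [List.count_cons, ih] <;> omega

-- a constant window inside a replicate-prefixed list lies in the prefix or past it
lemma infix_replicate_append {c cur t : Bool} {cnt k : Nat} (hk : 1 ≤ k) (ht : t ≠ cur)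
    (ts : List Bool) :
    (List.replicate k c).IsInfix (List.replicate cnt cur ++ t :: ts) ↔
      (c = cur ∧ k ≤ cnt) ∨ (List.replicate k c).IsInfix (t :: ts) := by
  constructor
  · rintro ⟨s, r, hsr⟩
    rw [List.append_assoc] at hsr
    by_cases hj : cnt ≤ s.length
    · right
      have hdrop : List.replicate k c ++ r = (t :: ts).drop (s.length - cnt) := by
        have h := congrArg (List.drop s.length) hsr
        rwa [List.drop_left, List.drop_append, List.drop_replicate, List.length_replicate,
          Nat.sub_eq_zero_of_le hj, List.replicate_zero, List.nil_append] at h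
      exact (List.IsPrefix.isInfix ⟨r, hdrop⟩).trans (List.drop_suffix _ _).isInfix
    · rw [not_le] at hj
      have h1 : (s ++ (List.replicate k c ++ r))[s.length]? = some c := by
        rw [List.getElem?_append_right le_rfl, Nat.sub_self,
          List.getElem?_append_left (by simpa using hk)]
        exact List.getElem?_replicate_of_lt hk
      have h2 : (List.replicate cnt cur ++ t :: ts)[s.length]? = some cur := by
        rw [List.getElem?_append_left (by simpa using hj)]
        exact List.getElem?_replicate_of_lt hj
      rw [hsr, h2] at h1
      have hc : c = cur := by simpa using h1.symm
      left
      refine ⟨hc, ?_⟩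
      by_contra hklt
      rw [not_le] at hklt
      have h3 : (s ++ (List.replicate k c ++ r))[cnt]? = some c := by
        rw [List.getElem?_append_right (le_of_lt hj),
          List.getElem?_append_left (by simp; omega)]
        exact List.getElem?_replicate_of_lt (by omega)
      have h4 : (List.replicate cnt cur ++ t :: ts)[cnt]? = some t := by
        rw [List.getElem?_append_right (by simp)]
        simp
      rw [hsr, h4] at h3
      have : t = c := by simpa using h3
      exact ht (this.trans hc)
  · rintro (⟨hc, hkc⟩ | hinf)
    · subst hc
      refine ⟨[], List.replicate (cnt - k) c ++ t :: ts, ?_⟩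
      simp only [List.nil_append, ← List.append_assoc, ← List.replicate_add]
      rw [Nat.add_sub_cancel' hkc]
    · exact hinf.trans ⟨List.replicate cnt cur, [], by simp⟩

-- k ≤ longest run ↔ a constant window of width k exists (k ≥ 1)
lemma runsAux_iff_infix (k : Int) (hk : 1 ≤ k) (ts : List Bool) : ∀ (cur : Bool) (cnt : Nat),
    1 ≤ cnt →
    (k ≤ (pvRunsAux cur (cnt : Int) ts).foldl max 0 ↔
      ∃ c, (List.replicate k.toNat c).IsInfix (List.replicate cnt cur ++ ts)) := by
  induction ts with
  | nil =>
    intro cur cnt h1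
    simp only [pvRunsAux, List.foldl_cons, List.foldl_nil, List.append_nil]
    rw [max_eq_right (by positivity)]
    constructor
    · intro h
      refine ⟨cur, [], List.replicate (cnt - k.toNat) cur, ?_⟩
      simp only [List.nil_append, ← List.replicate_add]
      rw [Nat.add_sub_cancel' (by omega)]
    · rintro ⟨c, hinf⟩
      have := hinf.length_le
      simp at this
      omega
  | cons t ts ih =>
    intro cur cnt h1
    by_cases h : t = cur
    · subst h
      have heq : List.replicate cnt t ++ t :: ts = List.replicate (cnt + 1) t ++ ts := by
        simp [List.replicate_succ']
      have hcast : ((cnt : Int) + 1) = (((cnt + 1 : Nat)) : Int) := by push_cast; ring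
      simp only [pvRunsAux, beq_self_eq_true, if_true, heq, hcast]
      exact ih t (cnt + 1) (by omega)
    · have hb : (t == cur) = false := by simp [h]
      simp only [pvRunsAux, hb, Bool.false_eq_true, if_false, List.foldl_cons]
      rw [max_comm (0 : Int) (cnt : Int), foldl_max_max, le_max_iff]
      have ihp := ih t 1 le_rfl
      simp only [Nat.cast_one, List.replicate_one, List.singleton_append] at ihp
      rw [ihp]
      constructor
      · rintro (hle | ⟨c, hinf⟩)
        · exact ⟨cur, (infix_replicate_append (by omega) h ts).mpr (Or.inl ⟨rfl, by omega⟩)⟩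
        · exact ⟨c, (infix_replicate_append (by omega) h ts).mpr (Or.inr hinf)⟩
      · rintro ⟨c, hinf⟩
        rcases (infix_replicate_append (by omega) h ts).mp hinf with ⟨hc, hkc⟩ | hinf'
        · left; omega
        · right; exact ⟨c, hinf'⟩

lemma maxRun_iff_infix (k : Int) (hk : 1 ≤ k) (block : List Bool) :
    k ≤ pvMaxRun block ↔ ∃ c, (List.replicate k.toNat c).IsInfix block := by
  cases block with
  | nil =>
    simp only [pvMaxRun, pvRuns, List.foldl_nil]
    constructor
    · intro h; omega
    · rintro ⟨c, hinf⟩; have := hinf.length_le; simp at this; omega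
  | cons t ts =>
    have := runsAux_iff_infix k hk ts t 1 le_rfl
    simpa [pvMaxRun, pvRuns] using this

-- adjacent equal pair ↔ a constant window of width 2
lemma hasAdj_iff_infix (l : List Bool) :
    pvHasAdj l = true ↔ ∃ c, (List.replicate 2 c).IsInfix l := by
  match l with
  | [] => simp [pvHasAdj]
  | [a] =>
    simp only [pvHasAdj, Bool.false_eq_true, false_iff, not_exists]
    intro c hinf
    have := hinf.length_le
    simp at this
  | a :: b :: l =>
    simp only [pvHasAdj, Bool.or_eq_true, beq_iff_eq, hasAdj_iff_infix (b :: l)]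
    constructor
    · rintro (hab | ⟨c, hinf⟩)
      · exact ⟨a, ⟨[], l, by simp [List.replicate, hab]⟩⟩
      · exact ⟨c, hinf.trans ⟨[a], [], by simp⟩⟩
    · rintro ⟨c, hinf⟩
      rcases List.infix_cons_iff.mp hinf with hpre | hinf'
      · left
        have h2 : List.replicate 2 c = [c, c] := rfl
        rw [h2] at hpre
        rcases List.cons_prefix_cons.mp hpre with ⟨hca, h3⟩
        rcases List.cons_prefix_cons.mp h3 with ⟨hcb, _⟩
        rw [← hca, ← hcb]
      · right; exact ⟨c, hinf'⟩

-- the window scan of B computes 'a constant window of width L exists' (L ≥ 2)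
lemma windowBad_iff (block : List Bool) (L : Int) (hL : 2 ≤ L) :
    pvWindowBad block L = true ↔ ∃ c, (List.replicate L.toNat c).IsInfix block := by
  unfold pvWindowBad
  rw [List.any_eq_true]
  constructor
  · rintro ⟨i, hi, hP⟩
    rw [PySem.List.mem_pyRange_one] at hi
    simp only [PySem.List.len_eq] at hi
    obtain ⟨h0, hlt⟩ := hi
    have hji : i = ((i.toNat : Nat) : Int) := by omega
    have hin : i.toNat < block.length := by omega
    have hLt : ((L.toNat : Nat) : Int) = L := Int.toNat_of_nonneg (by omega)
    rw [hji, PySem.List.pyGet?_natCast, List.getElem?_eq_getElem hin] at hP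
    simp only at hP
    refine ⟨block[i.toNat], ?_⟩
    rw [← hLt, PySem.List.slice_natCast_add, PySem.List.pyRepeat_singleton,
      beq_iff_eq] at hP
    simp only [Int.toNat_natCast] at hP
    rw [← hP]
    exact ((List.take_prefix _ _).isInfix).trans (List.drop_suffix _ _).isInfix
  · rintro ⟨c, s, r, hsr⟩
    have hlen : block.length = s.length + L.toNat + r.length := by
      have := congrArg List.length hsr
      simp at this
      omega
    have hLt : ((L.toNat : Nat) : Int) = L := Int.toNat_of_nonneg (by omega)
    refine ⟨(s.length : Int), ?_, ?_⟩
    · rw [PySem.List.mem_pyRange_one]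
      simp only [PySem.List.len_eq]
      omega
    · rw [List.append_assoc] at hsr
      have hget : PySem.List.pyGet? block (s.length : Int) = some c := by
        rw [PySem.List.pyGet?_natCast, ← hsr,
          List.getElem?_append_right le_rfl, Nat.sub_self,
          List.getElem?_append_left (by simp; omega)]
        exact List.getElem?_replicate_of_lt (by omega)
      have hslice : PySem.List.slice block (some (s.length : Int))
          (some ((s.length : Int) + L)) = List.replicate L.toNat c := by
        conv_lhs => rw [← hLt]
        rw [PySem.List.slice_natCast_add, ← hsr, List.drop_left,
          List.take_append_of_le_length (by simp), List.take_replicate]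
        simp
      simp only [hget, hslice, PySem.List.pyRepeat_singleton]
      simp
-- per-block decisions of the two ports
def pvBlockA (block : List Bool) (m : Int) : Bool :=
  match pvInnerA m block none 0 0 0 with
  | none => false
  | some (go, nogo) => !(decide (go ≠ 42 ∨ nogo ≠ 18))

def pvBlockB (block : List Bool) (L : Int) : Bool :=
  if PySem.List.len block ≠ 60 ∨ pvSum block ≠ 42 then false
  else if pvWindowBad block L then false
  else true

lemma pvSum_eq (l : List Bool) : pvSum l = (l.count true : Int) := by
  unfold pvSum
  rw [PySem.List.sum_map_ite_one_zero]
  congr 1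
  rw [List.count]
  congr 1
  funext t
  cases t <;> simp

lemma blockA_eq_blockB (block : List Bool) (m : Int) :
    pvBlockA block m = pvBlockB block (max (m + 1) 2) := by
  have hL : 2 ≤ max (m + 1) 2 := le_max_right _ _
  have hwin : pvWindowBad block (max (m + 1) 2) = true ↔
      pvInnerA m block none 0 0 0 = none := by
    cases block with
    | nil =>
      rw [windowBad_iff _ _ hL]
      constructor
      · rintro ⟨c, hinf⟩
        have := hinf.length_le
        simp at this
      · intro h
        exact absurd h (by simp [pvInnerA])
    | cons t ts =>
      have hstep : pvInnerA m (t :: ts) none 0 0 0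
          = pvInnerA m ts (some t) 1 (if t then 1 else 0) (if t then 0 else 1) := by
        simp [pvInnerA]
      rw [hstep, windowBad_iff _ _ hL]
      by_cases hm : 1 ≤ m
      · have hmax : max (m + 1) 2 = m + 1 := max_eq_left (by omega)
        rw [hmax]
        rw [innerA_none_iff m hm ts t 1 _ _ le_rfl hm]
        have hrun := maxRun_iff_infix (m + 1) (by omega) (t :: ts)
        simp only [pvMaxRun, pvRuns] at hrun
        rw [← hrun]
        omega
      · have hmax : max (m + 1) 2 = 2 := max_eq_right (by omega)
        rw [hmax]
        rw [innerA_none_iff_nonpos m (by omega) ts t _ _ 1 le_rfl]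
        rw [show Int.toNat 2 = 2 from rfl, ← hasAdj_iff_infix]
  rcases hI : pvInnerA m block none 0 0 0 with _ | ⟨g, n⟩
  · have hw : pvWindowBad block (max (m + 1) 2) = true := hwin.mpr hI
    simp only [pvBlockA, pvBlockB, hI, hw]
    split_ifs <;> rfl
  · have hw : pvWindowBad block (max (m + 1) 2) = false := by
      rcases hb : pvWindowBad block (max (m + 1) 2) with _ | _
      · rfl
      · rw [hwin.mp hb] at hI; exact absurd hI (by simp)
    have hc := innerA_counts m block none 0 0 0 g n hI
    have hg : g = (block.count true : Int) := by rw [hc.1]; ring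
    have hn : n = (block.length : Int) - block.count true := by
      rw [hc.2, ← count_false_eq]; ring
    have hiff : (g ≠ 42 ∨ n ≠ 18) ↔
        (PySem.List.len block ≠ 60 ∨ pvSum block ≠ 42) := by
      rw [PySem.List.len_eq, pvSum_eq, hg, hn]
      omega
    simp only [pvBlockA, pvBlockB, hI, hw]
    by_cases hP : g ≠ 42 ∨ n ≠ 18
    · rw [if_pos (hiff.mp hP)]
      simp [hP]
    · rw [if_neg (fun hx => hP (hiff.mpr hx))]
      simp [hP]

lemma check_gng_eq_all (sequence : List (Int × List Bool)) (m : Int) :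
    check_gng sequence m = sequence.all (fun p => pvBlockA p.2 m) := by
  induction sequence with
  | nil => rfl
  | cons p rest ih =>
    obtain ⟨kk, block⟩ := p
    simp only [check_gng, List.all_cons]
    rcases h : pvInnerA m block none 0 0 0 with _ | ⟨go, nogo⟩
    · simp [pvBlockA, h]
    · by_cases hcnt : go ≠ 42 ∨ nogo ≠ 18
      · simp [pvBlockA, h, hcnt]
      · simp [pvBlockA, h, hcnt, ih]

lemma checkBlocks_eq_all (sequence : List (Int × List Bool)) (L : Int) :
    pvCheckBlocks L sequence = sequence.all (fun p => pvBlockB p.2 L) := by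
  induction sequence with
  | nil => rfl
  | cons p rest ih =>
    obtain ⟨kk, block⟩ := p
    simp only [pvCheckBlocks, List.all_cons]
    by_cases h1 : (PySem.List.len block ≠ 60 ∨ pvSum block ≠ 42)
    · rw [if_pos h1]
      have hB : pvBlockB block L = false := by
        simp only [pvBlockB]
        rw [if_pos h1]
      simp [hB]
    · rw [if_neg h1]
      rcases h2 : pvWindowBad block L with _ | _
      · have hB : pvBlockB block L = true := by
          simp only [pvBlockB]
          rw [if_neg h1, h2]
          rfl
        simp [hB, ih]
      · have hB : pvBlockB block L = false := by
          simp only [pvBlockB]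
          rw [if_neg h1, h2]
          rfl
        simp [hB]

-- ===== VERDICT (by name: the statement is the Claim_ definition above) =====
theorem check_gng_spec : Claim_equal_check_gng := by
  intro sequence m _
  show check_gng sequence m = check_gng_alt sequence m
  rw [check_gng_eq_all, check_gng_alt, checkBlocks_eq_all]
  exact congrArg _ (funext fun p => blockA_eq_blockB p.2 m)
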